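-- pv_equiv track=rewrite | github.com/yunshengtian/ASAP | plan_robot/util_grasp.py | get_gripper_hand_names
-- ===== SOURCE A (Python) =====
-- def get_gripper_hand_names(gripper_type, suffix=None):
--     if gripper_type == 'panda':
--         names = ['panda_hand']
--     elif gripper_type == 'robotiq-85':
--         names = ['robotiq_base']
--         for side_i in ['left', 'right']:
--             for side_j in ['outer', 'inner']:
--                 for link in ['knuckle', 'finger']:
--                     name = f'{side_i}_{side_j}_{link}'
--                     if name not in ['left_inner_finger', 'right_inner_finger']:
--                         names.append(f'robotiq_{name}')
--     elif gripper_type == 'robotiq-140':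
--         names = ['robotiq_base']
--         for side_i in ['left', 'right']:
--             for side_j in ['outer', 'inner']:
--                 for link in ['knuckle', 'finger']:
--                     name = f'{side_i}_{side_j}_{link}'
--                     names.append(f'robotiq_{name}')
--     else:
--         raise NotImplementedError
--     if suffix is not None:
--         names = [f'{name}_{suffix}' for name in names]
--     return names
-- ===== SOURCE B (Python) =====
-- _GRIPPER_HAND_NAMES = {
--     'panda': ['panda_hand'],
--     'robotiq-85': ['robotiq_base',
--                    'robotiq_left_outer_knuckle', 'robotiq_left_outer_finger',
--                    'robotiq_left_inner_knuckle',
--                    'robotiq_right_outer_knuckle', 'robotiq_right_outer_finger',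
--                    'robotiq_right_inner_knuckle'],
--     'robotiq-140': ['robotiq_base',
--                     'robotiq_left_outer_knuckle', 'robotiq_left_outer_finger',
--                     'robotiq_left_inner_knuckle', 'robotiq_left_inner_finger',
--                     'robotiq_right_outer_knuckle', 'robotiq_right_outer_finger',
--                     'robotiq_right_inner_knuckle', 'robotiq_right_inner_finger'],
-- }
--
-- def get_gripper_hand_names(gripper_type, suffix=None):
--     try:
--         names = _GRIPPER_HAND_NAMES[gripper_type]
--     except KeyError:
--         raise NotImplementedError
--     if suffix is None:
--         return list(names)
--     return [f'{name}_{suffix}' for name in names]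
-- ===== Notes on version B (the rewrite author's own statement) =====
-- stated objective: simpler
-- what changed: Replaces the nested loop-and-filter construction per gripper type with a single precomputed constant table keyed by gripper_type, then one suffix map.
import Mathlib
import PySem

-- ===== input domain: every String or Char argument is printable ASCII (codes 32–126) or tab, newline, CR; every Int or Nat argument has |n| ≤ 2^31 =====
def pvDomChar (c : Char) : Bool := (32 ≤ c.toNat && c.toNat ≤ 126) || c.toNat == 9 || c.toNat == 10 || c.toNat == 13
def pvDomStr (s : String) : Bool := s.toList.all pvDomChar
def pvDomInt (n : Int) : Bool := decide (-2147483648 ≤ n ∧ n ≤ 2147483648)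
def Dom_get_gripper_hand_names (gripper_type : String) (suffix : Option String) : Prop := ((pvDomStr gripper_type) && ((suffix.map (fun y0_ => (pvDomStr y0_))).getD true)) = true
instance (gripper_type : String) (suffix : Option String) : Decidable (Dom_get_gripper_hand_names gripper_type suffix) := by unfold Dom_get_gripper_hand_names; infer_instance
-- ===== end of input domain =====

-- B replaces A's nested loop-and-filter construction with a constant table keyed by
-- gripper_type (objective: simpler). Both raise (Pre_ excludes unknown gripper types).

-- ===== PORT A =====
-- the triple nested loop over ['left','right'] × ['outer','inner'] × ['knuckle','finger'],
-- as folds over the same literal lists, with the same filter for robotiq-85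
def get_gripper_hand_names (gripper_type : String) (suffix : Option String) : List String :=
  let names :=
    if gripper_type == "panda" then ["panda_hand"]
    else if gripper_type == "robotiq-85" then
      ["left", "right"].foldl (fun acc side_i =>
        ["outer", "inner"].foldl (fun acc side_j =>
          ["knuckle", "finger"].foldl (fun acc link =>
            let name := side_i ++ "_" ++ side_j ++ "_" ++ link
            if name ∈ ["left_inner_finger", "right_inner_finger"] then acc
            else acc ++ ["robotiq_" ++ name]) acc) acc) ["robotiq_base"]
    else if gripper_type == "robotiq-140" then
      ["left", "right"].foldl (fun acc side_i =>
        ["outer", "inner"].foldl (fun acc side_j =>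
          ["knuckle", "finger"].foldl (fun acc link =>
            acc ++ ["robotiq_" ++ (side_i ++ "_" ++ side_j ++ "_" ++ link)]) acc) acc)
        ["robotiq_base"]
    else []  -- Python raises NotImplementedError here; excluded by Pre_
  match suffix with
  | none => names
  | some s => names.map (fun name => name ++ "_" ++ s)

-- ===== PORT B =====
def gripperHandNamesTable : PySem.Dict String (List String) :=
  PySem.Dict.ofList [("panda", ["panda_hand"]),
   ("robotiq-85",
    ["robotiq_base",
     "robotiq_left_outer_knuckle", "robotiq_left_outer_finger",
     "robotiq_left_inner_knuckle",
     "robotiq_right_outer_knuckle", "robotiq_right_outer_finger",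
     "robotiq_right_inner_knuckle"]),
   ("robotiq-140",
    ["robotiq_base",
     "robotiq_left_outer_knuckle", "robotiq_left_outer_finger",
     "robotiq_left_inner_knuckle", "robotiq_left_inner_finger",
     "robotiq_right_outer_knuckle", "robotiq_right_outer_finger",
     "robotiq_right_inner_knuckle", "robotiq_right_inner_finger"])]

def get_gripper_hand_names_alt (gripper_type : String) (suffix : Option String) : List String :=
  let names := (PySem.Dict.get? gripperHandNamesTable gripper_type).getD []
    -- Python raises NotImplementedError on a missing key; excluded by Pre_
  match suffix with
  | none => names
  | some s => names.map (fun name => name ++ "_" ++ s)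

-- ===== PRECONDITION & SPEC =====
-- A raises NotImplementedError for any gripper_type other than these three.
def Pre_get_gripper_hand_names (gripper_type : String) (suffix : Option String) : Prop :=
  gripper_type = "panda" ∨ gripper_type = "robotiq-85" ∨ gripper_type = "robotiq-140"
instance (gripper_type : String) (suffix : Option String) : Decidable (Pre_get_gripper_hand_names gripper_type suffix) := by unfold Pre_get_gripper_hand_names; infer_instance
def pvWitness_get_gripper_hand_names : String × Option String := ("robotiq-85", some "0")

def Spec_get_gripper_hand_names (gripper_type : String) (suffix : Option String) (out : List String) : Prop := out = get_gripper_hand_names_alt gripper_type suffix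
instance (gripper_type : String) (suffix : Option String) (out : List String) : Decidable (Spec_get_gripper_hand_names gripper_type suffix out) := by unfold Spec_get_gripper_hand_names; infer_instance

-- ===== CLAIM (what is proved, stated in full; the proofs are below) =====
def Claim_equal_get_gripper_hand_names : Prop := ∀ (gripper_type : String) (suffix : Option String), Dom_get_gripper_hand_names gripper_type suffix → Pre_get_gripper_hand_names gripper_type suffix → Spec_get_gripper_hand_names gripper_type suffix (get_gripper_hand_names gripper_type suffix)

-- ===== LEMMAS AND PROOFS =====

-- ===== VERDICT (by name: the statement is the Claim_ definition above) =====
theorem get_gripper_hand_names_spec : Claim_equal_get_gripper_hand_names := by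
  intro gripper_type suffix _ hpre
  unfold Spec_get_gripper_hand_names
  rcases hpre with h | h | h <;> subst h <;> cases suffix <;> rfl
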